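-- pv_equiv track=rewrite | github.com/daalgi/algorithms | graphs/jump_game4.py | bfs
-- ===== SOURCE A (Python) =====
-- from typing import List
-- from collections import defaultdict, deque
--
-- def bfs(arr: List[int]) -> int:
--     # Time complexity: O(n)
--     # Space complexity: O(n)
--
--     n = len(arr)
--     if n == 1:
--         return 0
--
--     # Hashtable to identify the indices where each
--     # number can be found in the input list `arr`
--     # { number: [index_i, index_j, ...], ... }
--     indices = defaultdict(list)
--     for i in range(n):
--         indices[arr[i]].append(i)
--
--     # Hashset to keep track of the indices visited
--     visited = set()
--     # Queue to store the next jumps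
--     q = deque([(0, 0)])
--     while q:
--         steps, node = q.popleft()
--
--         # If the current `node` is the last in `arr`,
--         # return the number of steps
--         if node == n - 1:
--             return steps
--
--         # If `node` has already been `visited`,
--         # continue with the next one in the queue
--         if node in visited:
--             continue
--
--         # Add the current `node` to the `visited` hashset
--         visited.add(node)
--
--         # Check the next nodes we can jump to directly
--         # (same number in `arr`)
--         for next_node in indices[arr[node]]:
--             if next_node != node:
--                 q.append((steps + 1, next_node))
--
--         # Check the nearby nodes (node - 1, node + 1)
--         for next_node in [node - 1, node + 1]:
--             if 0 < next_node < n: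
--                 q.append((steps + 1, next_node))
--
--         # Remove the indices for the
--         # current number in `node`: arr[node].
--         # This way we avoid adding them again to the queue later on
--         indices[arr[node]] = []
--
--     return
-- ===== SOURCE B (Python) =====
-- from typing import List
--
--
-- def bfs(arr: List[int]) -> int:
--     # Round-based reachability closure: no queue, no visited set, no
--     # value->indices map; each round recomputes the reached mask from the
--     # previous one in a single whole-array pass.
--     n = len(arr)
--     if n == 1:
--         return 0
--     reached = [i == 0 for i in range(n)]
--     steps = 0
--     while not reached[n - 1]:
--         vals = {arr[i] for i, r in enumerate(reached) if r}
--         reached = [r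
--                    or arr[i] in vals
--                    or (i >= 1 and reached[i - 1])
--                    or (i >= 1 and i + 1 < n and reached[i + 1])
--                    for i, r in enumerate(reached)]
--         steps += 1
--     return steps
-- ===== Notes on version B (the rewrite author's own statement) =====
-- stated objective: alternative
-- what changed: Replaces the queue/visited/value-index-map BFS by a round-based reachability closure: a boolean reached mask recomputed from scratch each round in one whole-array pass (Bellman-Ford-style level relaxation), returning the round count when the last index becomes reachable; trades A's O(n) queue BFS for O(n) passes without any queue, visited set or bucket clearing.
import Mathlib
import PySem

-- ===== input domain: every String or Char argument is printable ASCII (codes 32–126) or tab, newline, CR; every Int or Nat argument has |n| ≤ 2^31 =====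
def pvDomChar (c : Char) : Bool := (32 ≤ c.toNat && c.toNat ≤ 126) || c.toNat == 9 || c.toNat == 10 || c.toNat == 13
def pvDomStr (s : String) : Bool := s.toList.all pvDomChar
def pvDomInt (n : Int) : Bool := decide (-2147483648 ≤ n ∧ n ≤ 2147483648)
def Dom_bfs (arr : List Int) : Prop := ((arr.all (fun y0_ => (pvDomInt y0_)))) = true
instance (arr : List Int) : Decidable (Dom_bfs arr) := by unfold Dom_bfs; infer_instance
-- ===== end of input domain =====

-- B replaces A's queue/visited/value-index-map BFS by a round-based
-- reachability closure: a boolean reached mask is recomputed from the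
-- previous one in a whole-array pass each round, and the round count is
-- returned when the last index becomes reachable (objective: alternative).
-- Both loop ports carry a fuel counter as a totality guard only; it is
-- proved never to run out on admitted inputs.

-- ===== PORT A =====
-- indices = defaultdict(list); for i in range(n): indices[arr[i]].append(i)
-- (the i ∈ range(n) index is always in range, so `(pyGet? arr i).getD 0` is arr[i])
def bfsIdxA (arr : List Int) : PySem.Dict Int (List Int) :=
  (PySem.List.pyRange 0 (PySem.List.len arr)).foldl
    (fun d i =>
      let a := (PySem.List.pyGet? arr i).getD 0
      d.insert a (d.getD a [] ++ [i]))
    PySem.Dict.empty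

-- while q: steps, node = q.popleft(); …  (fuel is a totality guard only)
def bfsLoopA (arr : List Int) (n : Int) (fuel : Nat) (q : List (Int × Int))
    (visited : PySem.Set Int) (indices : PySem.Dict Int (List Int)) : Option Int :=
  match q with
  | [] => none                     -- Python falls through (never reached for arr ≠ [])
  | (steps, node) :: rest =>
    match fuel with
    | 0 => none
    | fuel' + 1 =>
      if node = n - 1 then some steps
      else if visited.contains node then bfsLoopA arr n fuel' rest visited indices
      else
        let visited' := PySem.Set.add visited node
        let a := (PySem.List.pyGet? arr node).getD 0   -- arr[node], in range whenever reached
        let q2 := rest ++ ((indices.getD a []).filter (fun j => j != node)).map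
                            (fun j => (steps + 1, j))
        let q3 := q2 ++ (if 0 < node - 1 ∧ node - 1 < n then [(steps + 1, node - 1)] else [])
                     ++ (if 0 < node + 1 ∧ node + 1 < n then [(steps + 1, node + 1)] else [])
        bfsLoopA arr n fuel' q3 visited' (indices.insert a [])

def bfs (arr : List Int) : Int :=
  let n := PySem.List.len arr
  if n = 1 then 0
  else (bfsLoopA arr n ((arr.length + 2) * (arr.length + 2)) [(0, 0)]
          PySem.Set.empty (bfsIdxA arr)).getD 0

-- ===== PORT B =====
-- vals = {arr[i] for i, r in enumerate(reached) if r}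
def bfsVals (arr : List Int) (reached : List Bool) : PySem.Set Int :=
  PySem.Set.ofList (((PySem.List.enumerate reached).filter (fun p => p.2)).map
    (fun p => (PySem.List.pyGet? arr p.1).getD 0))

-- reached = [r or arr[i] in vals or (i >= 1 and reached[i-1])
--              or (i >= 1 and i+1 < n and reached[i+1]) for i, r in enumerate(reached)]
def bfsStep (arr : List Int) (n : Int) (reached : List Bool) : List Bool :=
  let vals := bfsVals arr reached
  (PySem.List.enumerate reached).map (fun p =>
    p.2 || vals.contains ((PySem.List.pyGet? arr p.1).getD 0)
        || (decide (1 ≤ p.1) && (PySem.List.pyGet? reached (p.1 - 1)).getD false)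
        || (decide (1 ≤ p.1) && decide (p.1 + 1 < n)
              && (PySem.List.pyGet? reached (p.1 + 1)).getD false))

-- while not reached[n-1]: … ; steps += 1   (fuel is a totality guard only)
def bfsLoopAlt (arr : List Int) (n : Int) (fuel : Nat) (reached : List Bool)
    (steps : Int) : Option Int :=
  if (PySem.List.pyGet? reached (n - 1)).getD false then some steps
  else
    match fuel with
    | 0 => none
    | f + 1 => bfsLoopAlt arr n f (bfsStep arr n reached) (steps + 1)

def bfs_alt (arr : List Int) : Int :=
  let n := PySem.List.len arr
  if n = 1 then 0
  else (bfsLoopAlt arr n arr.length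
          ((PySem.List.pyRange 0 n).map (fun i => i == 0)) 0).getD 0

-- ===== PRECONDITION & SPEC =====
-- Pre_ excludes only the empty list, on which Python A raises IndexError (arr[0]).
def Pre_bfs (arr : List Int) : Prop := arr ≠ []
instance (arr : List Int) : Decidable (Pre_bfs arr) := by unfold Pre_bfs; infer_instance
def pvWitness_bfs : List Int := ([7, 6, 9, 6, 9, 6, 9, 8])

def Spec_bfs (arr : List Int) (out : Int) : Prop := out = bfs_alt arr
instance (arr : List Int) (out : Int) : Decidable (Spec_bfs arr out) := by unfold Spec_bfs; infer_instance

-- ===== CLAIM (what is proved, stated in full; the proofs are below) =====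
def Claim_equal_bfs : Prop := ∀ (arr : List Int), Dom_bfs arr → Pre_bfs arr → Spec_bfs arr (bfs arr)

-- ===== LEMMAS AND PROOFS =====

-- ---------- the abstract reachability recurrence both programs compute ----------

-- Rk arr k i: index i is reachable from 0 in at most k jumps.
def Rk (arr : List Int) : Nat → Nat → Prop
  | 0, i => i = 0
  | k + 1, i => Rk arr k i ∨
      (i < arr.length ∧ ∃ j, j < arr.length ∧ Rk arr k j ∧ arr.getD j 0 = arr.getD i 0) ∨
      (1 ≤ i ∧ i < arr.length ∧ Rk arr k (i - 1)) ∨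
      (1 ≤ i ∧ i + 1 < arr.length ∧ Rk arr k (i + 1))

-- the one-jump adjacency used by A's queue loop
def AdjN (arr : List Int) (j i : Nat) : Prop :=
  (j < arr.length ∧ i < arr.length ∧ arr.getD j 0 = arr.getD i 0) ∨
  (i = j + 1 ∧ i < arr.length) ∨
  (j = i + 1 ∧ 1 ≤ i ∧ j < arr.length)

lemma Rk_succ_iff (arr : List Int) (k : Nat) (i : Nat) :
    Rk arr (k + 1) i ↔ Rk arr k i ∨ ∃ j, Rk arr k j ∧ AdjN arr j i := by
  constructor
  · intro h
    rcases h with h | ⟨hi, j, hj, hr, he⟩ | ⟨h1, h2, hr⟩ | ⟨h1, h2, hr⟩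
    · exact Or.inl h
    · exact Or.inr ⟨j, hr, Or.inl ⟨hj, hi, he⟩⟩
    · exact Or.inr ⟨i - 1, hr, Or.inr (Or.inl ⟨by omega, h2⟩)⟩
    · exact Or.inr ⟨i + 1, hr, Or.inr (Or.inr ⟨rfl, h1, h2⟩)⟩
  · intro h
    rcases h with h | ⟨j, hr, hadj⟩
    · exact Or.inl h
    · rcases hadj with ⟨hj, hi, he⟩ | ⟨he, hi⟩ | ⟨he, h1, hj⟩
      · exact Or.inr (Or.inl ⟨hi, j, hj, hr, he⟩)
      · refine Or.inr (Or.inr (Or.inl ⟨by omega, hi, ?_⟩))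
        have : i - 1 = j := by omega
        rwa [this]
      · refine Or.inr (Or.inr (Or.inr ⟨h1, by omega, ?_⟩))
        have : i + 1 = j := by omega
        rwa [this]

lemma Rk_mono (arr : List Int) {k k' : Nat} (h : k ≤ k') {i : Nat} :
    Rk arr k i → Rk arr k' i := by
  induction k' with
  | zero => intro hr; have : k = 0 := by omega
            subst this; exact hr
  | succ m ih =>
    intro hr
    rcases Nat.lt_or_ge k (m + 1) with hk | hk
    · exact Or.inl (ih (by omega) hr)
    · have : k = m + 1 := by omega
      subst this; exact hr

lemma Rk_lt (arr : List Int) (hL : 0 < arr.length) {k i : Nat} (h : Rk arr k i) :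
    i < arr.length := by
  induction k generalizing i with
  | zero => cases h; omega
  | succ m ih =>
    rcases h with h | ⟨hi, _⟩ | ⟨_, hi, _⟩ | ⟨_, hi, _⟩
    · exact ih h
    · exact hi
    · exact hi
    · omega

lemma Rk_chain (arr : List Int) {s : Nat} (h : s < arr.length) : Rk arr s s := by
  induction s with
  | zero => rfl
  | succ m ih =>
    exact Or.inr (Or.inr (Or.inl ⟨by omega, h, by simpa using ih (by omega)⟩))

lemma Rk_stab (arr : List Int) {k : Nat} (h : ∀ i, Rk arr (k + 1) i → Rk arr k i) :
    ∀ m i, Rk arr (k + m) i → Rk arr k i := by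
  intro m
  induction m with
  | zero => intro i hi; exact hi
  | succ p ih =>
    intro i hi
    rw [show k + (p + 1) = (k + p) + 1 from rfl, Rk_succ_iff] at hi
    rcases hi with hi | ⟨j, hj, hadj⟩
    · exact ih i hi
    · exact h i ((Rk_succ_iff arr k i).mpr (Or.inr ⟨j, ih j hj, hadj⟩))

lemma Rk_progress (arr : List Int) (hL : 0 < arr.length)
    (h : ¬ Rk arr k (arr.length - 1)) :
    ∃ i, i < arr.length ∧ Rk arr (k + 1) i ∧ ¬ Rk arr k i := by
  by_contra hc
  push Not at hc
  have hiff : ∀ i, Rk arr (k + 1) i → Rk arr k i := by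
    intro i hi
    by_cases hlt : i < arr.length
    · exact hc i hlt hi
    · exact absurd (Rk_lt arr hL hi) hlt
  have hstab := Rk_stab arr hiff
  rcases Nat.eq_zero_or_pos (arr.length - 1) with h0 | hpos
  · exact h (by rw [h0]; exact Rk_mono arr (Nat.zero_le k) rfl)
  · have hch : Rk arr (arr.length - 1) (arr.length - 1) := Rk_chain arr (by omega)
    exact h (hstab (arr.length - 1) (arr.length - 1)
      (Rk_mono arr (by omega) hch))

-- ---------- the value → indices map ----------

lemma enum_eq_range {α : Type} [Inhabited α] (arr : List α) : ∀ (s : Int),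
    PySem.List.enumerate arr s = (List.range arr.length).map (fun k : Nat => ((s + k : Int), arr.getD k default)) := by
  induction arr with
  | nil => intro s; simp [PySem.List.enumerate]
  | cons a t ih =>
    intro s
    rw [show PySem.List.enumerate (a :: t) s = (s, a) :: PySem.List.enumerate t (s+1) from rfl,
        ih (s+1), List.length_cons, List.range_succ_eq_map, List.map_cons, List.map_map]
    simp only [Nat.cast_zero, add_zero, List.getD_cons_zero]
    congr 1
    apply List.map_congr_left
    intro k _
    simp
    ring

-- B-side index map (same contents as A's defaultdict), used only in proofs
def bfsIdxB (arr : List Int) : PySem.Dict Int (List Int) :=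
  (PySem.List.enumerate arr).foldl
    (fun d p => d.insert p.2 (d.getD p.2 [] ++ [p.1]))
    PySem.Dict.empty

lemma bfsIdx_enum_eq (arr : List Int) :
    (PySem.List.pyRange 0 (PySem.List.len arr)).map
        (fun i => (i, (PySem.List.pyGet? arr i).getD 0))
      = PySem.List.enumerate arr := by
  rw [PySem.List.len_eq, PySem.List.pyRange_zero_nat, List.map_map, enum_eq_range]
  apply List.map_congr_left
  intro k hk
  simp at hk
  simp [PySem.List.pyGet?_natCast, List.getD_eq_getElem?_getD]

lemma bfsIdx_eq (arr : List Int) : bfsIdxA arr = bfsIdxB arr := by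
  unfold bfsIdxA bfsIdxB
  rw [← bfsIdx_enum_eq, List.foldl_map]

def grpB (arr : List Int) (v : Int) : List Int := (bfsIdxB arr).getD v []

lemma idxfold_getD (L : List (Int × Int)) :
    ∀ (d : PySem.Dict Int (List Int)) (k : Int),
    (L.foldl (fun d p => d.insert p.2 (d.getD p.2 [] ++ [p.1])) d).getD k []
      = d.getD k [] ++ (L.filter (fun p => p.2 == k)).map Prod.fst := by
  induction L with
  | nil => intro d k; simp
  | cons p t ih =>
    intro d k
    rw [List.foldl_cons, ih, PySem.Dict.getD_insert, List.filter_cons]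
    by_cases hk : k = p.2
    · subst hk
      rw [if_pos rfl]
      simp
    · rw [if_neg hk]
      have hb : (p.2 == k) = false := beq_eq_false_iff_ne.mpr (fun h => hk h.symm)
      rw [hb]
      simp

lemma grpB_eq (arr : List Int) (v : Int) :
    grpB arr v = ((PySem.List.enumerate arr).filter (fun p => p.2 == v)).map Prod.fst := by
  unfold grpB bfsIdxB
  rw [idxfold_getD]
  simp [PySem.Dict.getD_empty]

lemma mem_grpB (arr : List Int) (v x : Int) :
    x ∈ grpB arr v ↔ 0 ≤ x ∧ x.toNat < arr.length ∧ arr.getD x.toNat 0 = v := by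
  rw [grpB_eq]
  simp only [List.mem_map, List.mem_filter]
  constructor
  · rintro ⟨p, ⟨hp, hv⟩, hx⟩
    rw [PySem.List.mem_enumerate_iff] at hp
    obtain ⟨kk, hk, rfl⟩ := hp
    simp only [beq_iff_eq] at hv
    subst hx
    refine ⟨by omega, ?_, ?_⟩
    · simpa using hk
    · simp only [Int.zero_add, Int.toNat_natCast]
      rw [List.getD_eq_getElem?_getD]
      simpa [hk] using hv
  · rintro ⟨h0, h1, h2⟩
    rw [List.getD_eq_getElem?_getD] at h2
    refine ⟨((x.toNat : Int), arr[x.toNat]?.getD 0), ⟨?_, by simpa using h2⟩, by omega⟩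
    rw [PySem.List.mem_enumerate_iff]
    exact ⟨x.toNat, h1, by simp [h1]⟩

lemma grpB_len_le (arr : List Int) (v : Int) : (grpB arr v).length ≤ arr.length := by
  rw [grpB_eq, List.length_map]
  calc (List.filter (fun p => p.2 == v) (PySem.List.enumerate arr)).length
      ≤ (PySem.List.enumerate arr).length := List.length_filter_le _ _
    _ = arr.length := PySem.List.length_enumerate ..

-- ---------- A as a level-order loop (bridge used only in proofs) ----------

def bfsLoopL (arr : List Int) (n : Int) (fuel : Nat) (cur nxt : List Int) (steps : Int)
    (visited : PySem.Set Int) (indices : PySem.Dict Int (List Int)) : Option Int :=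
  match cur with
  | [] =>
    match nxt with
    | [] => none
    | y :: ys => bfsLoopL arr n fuel (y :: ys) [] (steps + 1) visited indices
  | node :: rest =>
    match fuel with
    | 0 => none
    | fuel' + 1 =>
      if node = n - 1 then some steps
      else if visited.contains node then bfsLoopL arr n fuel' rest nxt steps visited indices
      else
        let visited' := PySem.Set.add visited node
        let a := (PySem.List.pyGet? arr node).getD 0
        let nxt2 := nxt ++ (indices.getD a []).filter (fun j => j != node)
                        ++ (if 1 < node then [node - 1] else [])
                        ++ (if node + 1 < n then [node + 1] else [])
        bfsLoopL arr n fuel' rest nxt2 steps visited' (indices.insert a [])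
termination_by (fuel, if cur.isEmpty then 1 else 0)
decreasing_by
  · exact Prod.Lex.right fuel (by simp)
  · exact Prod.Lex.left _ _ (Nat.lt_succ_self _)
  · exact Prod.Lex.left _ _ (Nat.lt_succ_self _)

lemma idxfold_range (n : Int) (L : List (Int × Int)) :
    ∀ (d : PySem.Dict Int (List Int)),
    (∀ p ∈ L, 0 ≤ p.1 ∧ p.1 < n) → (∀ k x, x ∈ d.getD k [] → 0 ≤ x ∧ x < n) →
    ∀ k x, x ∈ (L.foldl (fun d p => d.insert p.2 (d.getD p.2 [] ++ [p.1])) d).getD k [] →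
      0 ≤ x ∧ x < n := by
  induction L with
  | nil => intro d _ hd; simpa using hd
  | cons p t ih =>
    intro d hL hd
    apply ih
    · intro q hq; exact hL q (by simp [hq])
    · intro k x hx
      rw [PySem.Dict.getD_insert] at hx
      by_cases hk : k = p.2
      · rw [if_pos hk] at hx
        rcases List.mem_append.1 hx with hx | hx
        · exact hd p.2 x hx
        · rw [List.mem_singleton] at hx; subst hx; exact hL p (by simp)
      · rw [if_neg hk] at hx; exact hd k x hx

lemma bfsIdx_range (arr : List Int) (k x : Int) (hx : x ∈ (bfsIdxB arr).getD k []) :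
    0 ≤ x ∧ x < PySem.List.len arr := by
  unfold bfsIdxB at hx
  refine idxfold_range _ _ _ ?_ ?_ k x hx
  · intro p hp
    rw [enum_eq_range] at hp
    simp at hp
    obtain ⟨j, hj, hp1, _⟩ := hp
    rw [PySem.List.len_eq]
    omega
  · intro k x hx; simp [PySem.Dict.getD_empty] at hx

-- One cons step of the simulation between A's queue and the level-order loop.
lemma bfs_sim_cons (arr : List Int) (n : Int) (fuel : Nat)
    (IH : ∀ m, m < fuel → ∀ (cur nxt : List Int) (steps : Int) (v : PySem.Set Int)
      (idx : PySem.Dict Int (List Int)),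
      (∀ x ∈ cur, 0 ≤ x ∧ x < n) → (∀ x ∈ nxt, 0 ≤ x ∧ x < n) →
      (∀ k x, x ∈ idx.getD k [] → 0 ≤ x ∧ x < n) →
      bfsLoopA arr n m (cur.map (fun x => (steps, x)) ++ nxt.map (fun x => (steps + 1, x))) v idx
        = bfsLoopL arr n m cur nxt steps v idx)
    (node : Int) (rest nxt : List Int) (steps : Int) (v : PySem.Set Int)
    (idx : PySem.Dict Int (List Int))
    (hcur : ∀ x ∈ node :: rest, 0 ≤ x ∧ x < n) (hnxt : ∀ x ∈ nxt, 0 ≤ x ∧ x < n)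
    (hidx : ∀ k x, x ∈ idx.getD k [] → 0 ≤ x ∧ x < n) :
    bfsLoopA arr n fuel ((node :: rest).map (fun x => (steps, x)) ++ nxt.map (fun x => (steps + 1, x))) v idx
      = bfsLoopL arr n fuel (node :: rest) nxt steps v idx := by
  obtain ⟨hnode0, hnoden⟩ := hcur node (by simp)
  cases fuel with
  | zero => simp only [List.map_cons, List.cons_append]; rw [bfsLoopA, bfsLoopL]
  | succ fuel' =>
    simp only [List.map_cons, List.cons_append]
    rw [bfsLoopA, bfsLoopL]
    by_cases hlast : node = n - 1
    · simp only [if_pos hlast]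
    · simp only [if_neg hlast]
      by_cases hvis : v.contains node
      · simp only [if_pos hvis]
        exact IH fuel' (Nat.lt_succ_self _) rest nxt steps v idx
          (fun x hx => hcur x (by simp [hx])) hnxt hidx
      · simp only [if_neg hvis]
        have hminus : (0 < node - 1 ∧ node - 1 < n) ↔ 1 < node := by omega
        have hplus : (0 < node + 1 ∧ node + 1 < n) ↔ node + 1 < n := by omega
        set a := (PySem.List.pyGet? arr node).getD 0 with ha
        set F := (idx.getD a []).filter (fun j => j != node) with hF
        set G := (if 1 < node then [node - 1] else ([] : List Int)) with hG
        set H := (if node + 1 < n then [node + 1] else ([] : List Int)) with hH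
        have e1 : (if 0 < node - 1 ∧ node - 1 < n then [(steps + 1, node - 1)] else [])
            = G.map (fun x => (steps + 1, x)) := by
          rw [hG]; by_cases h : 1 < node
          · rw [if_pos (hminus.mpr h), if_pos h]; rfl
          · rw [if_neg (fun hc => h (hminus.mp hc)), if_neg h]; rfl
        have e2 : (if 0 < node + 1 ∧ node + 1 < n then [(steps + 1, node + 1)] else [])
            = H.map (fun x => (steps + 1, x)) := by
          rw [hH]; by_cases h : node + 1 < n
          · rw [if_pos (hplus.mpr h), if_pos h]; rfl
          · rw [if_neg (fun hc => h (hplus.mp hc)), if_neg h]; rfl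
        rw [e1, e2]
        have equeue :
            rest.map (fun x => (steps, x)) ++ nxt.map (fun x => (steps + 1, x))
              ++ F.map (fun j => (steps + 1, j))
              ++ G.map (fun x => (steps + 1, x)) ++ H.map (fun x => (steps + 1, x))
            = rest.map (fun x => (steps, x))
              ++ (nxt ++ F ++ G ++ H).map (fun x => (steps + 1, x)) := by
          simp [List.map_append, List.append_assoc]
        rw [equeue]
        apply IH fuel' (Nat.lt_succ_self _)
        · exact fun x hx => hcur x (by simp [hx])
        · intro x hx
          rcases List.mem_append.1 hx with hx | hx
          · rcases List.mem_append.1 hx with hx | hx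
            · rcases List.mem_append.1 hx with hx | hx
              · exact hnxt x hx
              · exact hidx a x (List.mem_of_mem_filter hx)
            · rw [hG] at hx
              by_cases h : 1 < node
              · rw [if_pos h, List.mem_singleton] at hx; omega
              · rw [if_neg h] at hx; simp at hx
          · rw [hH] at hx
            by_cases h : node + 1 < n
            · rw [if_pos h, List.mem_singleton] at hx; omega
            · rw [if_neg h] at hx; simp at hx
        · intro k x hx
          rw [PySem.Dict.getD_insert] at hx
          by_cases hk : k = a
          · rw [if_pos hk] at hx; simp at hx
          · rw [if_neg hk] at hx; exact hidx k x hx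

-- Main simulation: A's queue is always the level-s frontier followed by the
-- level-(s+1) frontier of the level-order loop.
lemma bfs_sim (arr : List Int) (n : Int) (fuel : Nat) (cur nxt : List Int) (steps : Int)
    (v : PySem.Set Int) (idx : PySem.Dict Int (List Int))
    (hcur : ∀ x ∈ cur, 0 ≤ x ∧ x < n) (hnxt : ∀ x ∈ nxt, 0 ≤ x ∧ x < n)
    (hidx : ∀ k x, x ∈ idx.getD k [] → 0 ≤ x ∧ x < n) :
    bfsLoopA arr n fuel (cur.map (fun x => (steps, x)) ++ nxt.map (fun x => (steps + 1, x))) v idx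
      = bfsLoopL arr n fuel cur nxt steps v idx := by
  induction fuel using Nat.strong_induction_on generalizing cur nxt steps v idx with
  | _ fuel IH =>
    match cur with
    | [] =>
      match nxt with
      | [] => simp only [List.map_nil, List.nil_append]; rw [bfsLoopA, bfsLoopL]
      | y :: ys =>
        rw [show bfsLoopL arr n fuel [] (y :: ys) steps v idx
              = bfsLoopL arr n fuel (y :: ys) [] (steps + 1) v idx from by rw [bfsLoopL]]
        have := bfs_sim_cons arr n fuel (fun m hm => IH m hm) y ys [] (steps + 1) v idx
          hnxt (by intro x hx; simp at hx) hidx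
        simpa using this
    | x :: rest =>
      exact bfs_sim_cons arr n fuel (fun m hm => IH m hm) x rest nxt steps v idx hcur hnxt hidx

-- ---------- invariants for the level-order loop ----------

structure InvS (arr : List Int) (k : Nat) (cur nxt : List Int) (V : PySem.Set Int)
    (D : PySem.Dict Int (List Int)) : Prop where
  hcur : ∀ x ∈ cur, 0 ≤ x ∧ x.toNat < arr.length ∧ Rk arr k x.toNat
  hnxt : ∀ x ∈ nxt, 0 ≤ x ∧ x.toNat < arr.length ∧ Rk arr (k + 1) x.toNat
  hVhi : ∀ x, V.contains x = true → 0 ≤ x ∧ x.toNat < arr.length ∧ Rk arr k x.toNat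
  hcov : ∀ i : Nat, i < arr.length → Rk arr k i → V.contains (i : Int) = true ∨ (i : Int) ∈ cur
  hfront : ∀ i : Nat, i < arr.length → Rk arr (k + 1) i → ¬ Rk arr k i →
      (i : Int) ∈ nxt ∨ ∃ j : Nat, (j : Int) ∈ cur ∧ ¬ V.contains (j : Int) = true ∧ AdjN arr j i
  hdict : ∀ v, D.getD v [] = grpB arr v ∨
      (D.getD v [] = [] ∧ ∀ x ∈ grpB arr v, V.contains x = true ∨ x ∈ cur ∨ x ∈ nxt)
  htgt : ¬ V.contains ((arr.length : Int) - 1) = true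

-- ---------- fuel accounting ----------

def uCnt (arr : List Int) (V : PySem.Set Int) : Nat :=
  ((Finset.range arr.length).filter (fun i : Nat => ¬ V.contains (i : Int) = true)).card

def sCnt (arr : List Int) (D : PySem.Dict Int (List Int)) : Nat :=
  ∑ v ∈ arr.toFinset, (D.getD v []).length

def Phi (arr : List Int) (cur nxt : List Int) (V : PySem.Set Int)
    (D : PySem.Dict Int (List Int)) : Nat :=
  cur.length + nxt.length + 2 * uCnt arr V + sCnt arr D

lemma contains_add (V : PySem.Set Int) (x y : Int) :
    (PySem.Set.add V x).contains y = true ↔ V.contains y = true ∨ y = x := by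
  simp [PySem.Set.contains, PySem.Set.mem_add]

lemma uCnt_add (arr : List Int) (V : PySem.Set Int) (x : Int)
    (h0 : 0 ≤ x) (h1 : x.toNat < arr.length) (h2 : ¬ V.contains x = true) :
    uCnt arr (PySem.Set.add V x) + 1 = uCnt arr V := by
  unfold uCnt
  have hset : (Finset.range arr.length).filter
        (fun i : Nat => ¬ (PySem.Set.add V x).contains (i : Int) = true)
      = ((Finset.range arr.length).filter
        (fun i : Nat => ¬ V.contains (i : Int) = true)).erase x.toNat := by
    ext i
    simp only [Finset.mem_filter, Finset.mem_erase, Finset.mem_range, contains_add]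
    constructor
    · rintro ⟨hi, hni⟩
      refine ⟨fun he => hni (Or.inr (by omega)), hi, fun hc => hni (Or.inl hc)⟩
    · rintro ⟨hne, hi, hnc⟩
      exact ⟨hi, fun hc => by rcases hc with hc | hc; exact hnc hc; exact hne (by omega)⟩
  rw [hset]
  have hmem : x.toNat ∈ (Finset.range arr.length).filter
      (fun i : Nat => ¬ V.contains (i : Int) = true) := by
    simp only [Finset.mem_filter, Finset.mem_range]
    exact ⟨h1, by rwa [show ((x.toNat : Nat) : Int) = x by omega]⟩
  rw [Finset.card_erase_of_mem hmem]
  have := Finset.card_pos.mpr ⟨x.toNat, hmem⟩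
  omega

lemma sCnt_insert (arr : List Int) (D : PySem.Dict Int (List Int)) (v : Int)
    (hv : v ∈ arr.toFinset) :
    sCnt arr (D.insert v []) + (D.getD v []).length = sCnt arr D := by
  unfold sCnt
  rw [← Finset.add_sum_erase _ (fun v' => ((D.insert v ([] : List Int)).getD v' []).length) hv,
      ← Finset.add_sum_erase _ (fun v' => (D.getD v' []).length) hv]
  have h1 : ((D.insert v ([] : List Int)).getD v []).length = 0 := by
    rw [PySem.Dict.getD_insert, if_pos rfl]
    rfl
  have h2 : ∀ v' ∈ arr.toFinset.erase v,
      ((D.insert v ([] : List Int)).getD v' []).length = (D.getD v' []).length := by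
    intro v' hv'
    rw [PySem.Dict.getD_insert, if_neg (Finset.ne_of_mem_erase hv')]
  rw [h1, Finset.sum_congr rfl h2]
  omega

-- ---------- small helpers ----------

lemma pyget_in {α : Type} [Inhabited α] (xs : List α) (x : Int) (d : α)
    (h0 : 0 ≤ x) (h1 : x.toNat < xs.length) :
    (PySem.List.pyGet? xs x).getD d = xs.getD x.toNat d := by
  have hlt : x < (xs.length : Int) := by omega
  rw [PySem.List.pyGet?_eq_some_getElem xs h0 hlt]
  rw [List.getD_eq_getElem?_getD, List.getElem?_eq_getElem h1]

lemma pyget_nat {α : Type} [Inhabited α] (xs : List α) (k : Nat) (d : α) :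
    (PySem.List.pyGet? xs (k : Int)).getD d = xs.getD k d := by
  rw [PySem.List.pyGet?_natCast, List.getD_eq_getElem?_getD]

-- once the target is in the current frontier, the loop returns `steps`
lemma loopL_ret (arr : List Int) (n : Int) :
    ∀ (cur : List Int) (fuel : Nat) (nxt : List Int) (V : PySem.Set Int)
      (D : PySem.Dict Int (List Int)) (steps : Int),
    (n - 1) ∈ cur → cur.length ≤ fuel →
    bfsLoopL arr n fuel cur nxt steps V D = some steps := by
  intro cur
  induction cur with
  | nil => intro fuel nxt V D steps h _; simp at h
  | cons x rest ih =>
    intro fuel nxt V D steps hmem hlen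
    match fuel with
    | 0 => simp at hlen
    | f + 1 =>
      rw [bfsLoopL]
      by_cases hx : x = n - 1
      · rw [if_pos hx]
      · rw [if_neg hx]
        have hr : (n - 1) ∈ rest := by
          rcases List.mem_cons.1 hmem with h | h
          · exact absurd h.symm hx
          · exact h
        have hlen2 : rest.length ≤ f := by simpa using hlen
        by_cases hv : V.contains x
        · simp only [if_pos hv]
          exact ih f nxt V D steps hr hlen2
        · simp only [if_neg hv]
          exact ih f _ _ _ steps hr hlen2

-- ---------- invariant preservation ----------

lemma inv_skip (arr : List Int) (k : Nat) (x : Int) (rest nxt : List Int)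
    (V : PySem.Set Int) (D : PySem.Dict Int (List Int))
    (I : InvS arr k (x :: rest) nxt V D) (hv : V.contains x = true) :
    InvS arr k rest nxt V D where
  hcur := fun y hy => I.hcur y (List.mem_cons_of_mem _ hy)
  hnxt := I.hnxt
  hVhi := I.hVhi
  hcov := by
    intro i hi hr
    rcases I.hcov i hi hr with h | h
    · exact Or.inl h
    · rcases List.mem_cons.1 h with h | h
      · rw [h]; exact Or.inl hv
      · exact Or.inr h
  hfront := by
    intro i hi h1 h0
    rcases I.hfront i hi h1 h0 with h | ⟨j, hj, hjn, hadj⟩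
    · exact Or.inl h
    · rcases List.mem_cons.1 hj with h | h
      · exact absurd (h ▸ hv) hjn
      · exact Or.inr ⟨j, h, hjn, hadj⟩
  hdict := by
    intro v
    rcases I.hdict v with h | ⟨he, hc⟩
    · exact Or.inl h
    · refine Or.inr ⟨he, fun y hy => ?_⟩
      rcases hc y hy with h | h | h
      · exact Or.inl h
      · rcases List.mem_cons.1 h with h | h
        · rw [h]; exact Or.inl hv
        · exact Or.inr (Or.inl h)
      · exact Or.inr (Or.inr h)
  htgt := I.htgt

lemma inv_switch (arr : List Int) (k : Nat) (nxt : List Int)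
    (V : PySem.Set Int) (D : PySem.Dict Int (List Int))
    (I : InvS arr k [] nxt V D) :
    InvS arr (k + 1) nxt [] V D where
  hcur := I.hnxt
  hnxt := by intro x hx; simp at hx
  hVhi := by
    intro x hx
    obtain ⟨h0, h1, h2⟩ := I.hVhi x hx
    exact ⟨h0, h1, Rk_mono arr (Nat.le_succ k) h2⟩
  hcov := by
    intro i hi hr
    by_cases hk : Rk arr k i
    · rcases I.hcov i hi hk with h | h
      · exact Or.inl h
      · simp at h
    · rcases I.hfront i hi hr hk with h | ⟨j, hj, _, _⟩
      · exact Or.inr h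
      · simp at hj
  hfront := by
    intro i hi h1 h0
    rw [Rk_succ_iff] at h1
    rcases h1 with h1 | ⟨j, hj, hadj⟩
    · exact absurd h1 h0
    · have hjL : j < arr.length := by
        rcases hadj with ⟨h, _⟩ | ⟨h, h'⟩ | ⟨_, _, h⟩
        · exact h
        · omega
        · exact h
      have hjk : ¬ Rk arr k j := by
        intro hc
        exact h0 ((Rk_succ_iff arr k i).mpr (Or.inr ⟨j, hc, hadj⟩))
      have hjcur : (j : Int) ∈ nxt := by
        rcases I.hfront j hjL hj hjk with h | ⟨j', hj', _, _⟩
        · exact h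
        · simp at hj'
      have hjnv : ¬ V.contains (j : Int) = true := by
        intro hc
        exact hjk (I.hVhi _ hc).2.2
      exact Or.inr ⟨j, hjcur, hjnv, hadj⟩
  hdict := by
    intro v
    rcases I.hdict v with h | ⟨he, hc⟩
    · exact Or.inl h
    · refine Or.inr ⟨he, fun y hy => ?_⟩
      rcases hc y hy with h | h | h
      · exact Or.inl h
      · simp at h
      · exact Or.inr (Or.inl h)
  htgt := I.htgt

lemma mem_nxt2 (a x : Int) (nxt : List Int) (D : PySem.Dict Int (List Int))
    (n : Int) (y : Int) :
    y ∈ nxt ++ (D.getD a []).filter (fun j => j != x)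
        ++ (if 1 < x then [x - 1] else []) ++ (if x + 1 < n then [x + 1] else []) ↔
      y ∈ nxt ∨ (y ∈ D.getD a [] ∧ y ≠ x) ∨ (1 < x ∧ y = x - 1) ∨ (x + 1 < n ∧ y = x + 1) := by
  simp only [List.mem_append, List.mem_filter, bne_iff_ne]
  constructor
  · rintro (((h | h) | h) | h)
    · exact Or.inl h
    · exact Or.inr (Or.inl h)
    · split_ifs at h with hx
      · exact Or.inr (Or.inr (Or.inl ⟨hx, by simpa using h⟩))
      · simp at h
    · split_ifs at h with hx
      · exact Or.inr (Or.inr (Or.inr ⟨hx, by simpa using h⟩))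
      · simp at h
  · rintro (h | h | ⟨hx, rfl⟩ | ⟨hx, rfl⟩)
    · exact Or.inl (Or.inl (Or.inl h))
    · exact Or.inl (Or.inl (Or.inr h))
    · exact Or.inl (Or.inr (by rw [if_pos hx]; simp))
    · exact Or.inr (by rw [if_pos hx]; simp)

lemma inv_process (arr : List Int) (k : Nat) (x : Int) (rest nxt : List Int)
    (V : PySem.Set Int) (D : PySem.Dict Int (List Int))
    (I : InvS arr k (x :: rest) nxt V D)
    (hnv : ¬ V.contains x = true) (hxn : x ≠ (arr.length : Int) - 1) :
    InvS arr k rest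
      (nxt ++ (D.getD (arr.getD x.toNat 0) []).filter (fun j => j != x)
          ++ (if 1 < x then [x - 1] else [])
          ++ (if x + 1 < (arr.length : Int) then [x + 1] else []))
      (PySem.Set.add V x) (D.insert (arr.getD x.toNat 0) []) := by
  obtain ⟨hx0, hxlt, hxR⟩ := I.hcur x List.mem_cons_self
  set a := arr.getD x.toNat 0 with ha
  have hDsub : ∀ y, y ∈ D.getD a [] → y ∈ grpB arr a := by
    intro y hy
    rcases I.hdict a with h | ⟨he, _⟩
    · rwa [h] at hy
    · rw [he] at hy; simp at hy
  have hgrp : ∀ y, y ∈ grpB arr a → 0 ≤ y ∧ y.toNat < arr.length ∧ Rk arr (k + 1) y.toNat := by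
    intro y hy
    obtain ⟨h0, h1, h2⟩ := (mem_grpB arr a y).mp hy
    exact ⟨h0, h1, Or.inr (Or.inl ⟨h1, x.toNat, hxlt, hxR, by rw [h2]⟩)⟩
  refine ⟨?_, ?_, ?_, ?_, ?_, ?_, ?_⟩
  · exact fun y hy => I.hcur y (List.mem_cons_of_mem _ hy)
  · -- hnxt
    intro y hy
    rcases (mem_nxt2 a x nxt D _ y).mp hy with h | ⟨h, _⟩ | ⟨h, rfl⟩ | ⟨h, rfl⟩
    · exact I.hnxt y h
    · exact hgrp y (hDsub y h)
    · refine ⟨by omega, by omega, ?_⟩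
      refine Or.inr (Or.inr (Or.inr ⟨by omega, by omega, ?_⟩))
      have : (x - 1).toNat + 1 = x.toNat := by omega
      rwa [this]
    · refine ⟨by omega, by omega, ?_⟩
      refine Or.inr (Or.inr (Or.inl ⟨by omega, by omega, ?_⟩))
      have : (x + 1).toNat - 1 = x.toNat := by omega
      rwa [this]
  · -- hVhi
    intro y hy
    rcases (contains_add V x y).mp hy with h | rfl
    · exact I.hVhi y h
    · exact ⟨hx0, hxlt, hxR⟩
  · -- hcov
    intro i hi hr
    rcases I.hcov i hi hr with h | h
    · exact Or.inl ((contains_add V x _).mpr (Or.inl h))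
    · rcases List.mem_cons.1 h with h | h
      · exact Or.inl ((contains_add V x _).mpr (Or.inr h))
      · exact Or.inr h
  · -- hfront
    intro i hi h1 h0
    have hine : i ≠ x.toNat := fun he => h0 (he ▸ hxR)
    rcases I.hfront i hi h1 h0 with h | ⟨j, hj, hjn, hadj⟩
    · exact Or.inl ((mem_nxt2 a x nxt D _ _).mpr (Or.inl h))
    · by_cases hje : (j : Int) = x
      · -- the pending parent was x itself: its emission covers i
        have hjx : j = x.toNat := by omega
        subst hjx
        left
        apply (mem_nxt2 a x nxt D _ _).mpr
        rcases hadj with ⟨hjL, hiL, heq⟩ | ⟨hieq, hiL⟩ | ⟨hjeq, h1i, hjL⟩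
        · -- same-value edge
          have higrp : (i : Int) ∈ grpB arr a := by
            rw [mem_grpB]
            refine ⟨by omega, by simpa using hi, ?_⟩
            rw [show ((i : Int)).toNat = i by omega, ← heq]
          rcases I.hdict a with hd | ⟨he, hc⟩
          · refine Or.inr (Or.inl ⟨by rw [hd]; exact higrp, by omega⟩)
          · rcases hc _ higrp with h | h | h
            · exact absurd (I.hVhi _ h).2.2 (by rwa [show ((i:Int)).toNat = i by omega])
            · rcases List.mem_cons.1 h with h | h
              · exact absurd (by omega : i = x.toNat) hine
              · exact absurd ((I.hcur _ (List.mem_cons_of_mem _ h)).2.2) (by rwa [show ((i:Int)).toNat = i by omega])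
            · exact Or.inl h
        · -- i = x + 1
          refine Or.inr (Or.inr (Or.inr ⟨by omega, by omega⟩))
        · -- i = x - 1
          refine Or.inr (Or.inr (Or.inl ⟨by omega, by omega⟩))
      · refine Or.inr ⟨j, ?_, ?_, hadj⟩
        · rcases List.mem_cons.1 hj with h | h
          · exact absurd h hje
          · exact h
        · intro hc
          rcases (contains_add V x _).mp hc with h | h
          · exact hjn h
          · exact hje h
  · -- hdict
    intro v
    by_cases hva : v = a
    · subst hva
      refine Or.inr ⟨by rw [PySem.Dict.getD_insert, if_pos rfl], ?_⟩
      intro y hy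
      rcases I.hdict a with hd | ⟨he, hc⟩
      · by_cases hyx : y = x
        · exact Or.inl ((contains_add V x _).mpr (Or.inr hyx))
        · exact Or.inr (Or.inr ((mem_nxt2 a x nxt D _ _).mpr (Or.inr (Or.inl ⟨by rwa [hd], hyx⟩))))
      · rcases hc y hy with h | h | h
        · exact Or.inl ((contains_add V x _).mpr (Or.inl h))
        · rcases List.mem_cons.1 h with h | h
          · exact Or.inl ((contains_add V x _).mpr (Or.inr h))
          · exact Or.inr (Or.inl h)
        · exact Or.inr (Or.inr ((mem_nxt2 a x nxt D _ _).mpr (Or.inl h)))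
    · rcases I.hdict v with hd | ⟨he, hc⟩
      · exact Or.inl (by rw [PySem.Dict.getD_insert, if_neg hva, hd])
      · refine Or.inr ⟨by rw [PySem.Dict.getD_insert, if_neg hva, he], ?_⟩
        intro y hy
        rcases hc y hy with h | h | h
        · exact Or.inl ((contains_add V x _).mpr (Or.inl h))
        · rcases List.mem_cons.1 h with h | h
          · exact Or.inl ((contains_add V x _).mpr (Or.inr h))
          · exact Or.inr (Or.inl h)
        · exact Or.inr (Or.inr ((mem_nxt2 a x nxt D _ _).mpr (Or.inl h)))
  · -- htgt
    intro hc
    rcases (contains_add V x _).mp hc with h | h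
    · exact I.htgt h
    · exact hxn h.symm

lemma phi_process (arr : List Int) (x : Int) (rest nxt : List Int)
    (V : PySem.Set Int) (D : PySem.Dict Int (List Int))
    (h0 : 0 ≤ x) (h1 : x.toNat < arr.length) (hnv : ¬ V.contains x = true) :
    Phi arr rest
      (nxt ++ (D.getD (arr.getD x.toNat 0) []).filter (fun j => j != x)
          ++ (if 1 < x then [x - 1] else [])
          ++ (if x + 1 < (arr.length : Int) then [x + 1] else []))
      (PySem.Set.add V x) (D.insert (arr.getD x.toNat 0) []) < Phi arr (x :: rest) nxt V D := by
  have hu := uCnt_add arr V x h0 h1 hnv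
  have ha : arr.getD x.toNat 0 ∈ arr.toFinset := by
    rw [List.mem_toFinset, List.getD_eq_getElem?_getD, List.getElem?_eq_getElem h1]
    exact List.getElem_mem _
  have hs := sCnt_insert arr D (arr.getD x.toNat 0) ha
  have hf : ((D.getD (arr.getD x.toNat 0) []).filter (fun j => j != x)).length
      ≤ (D.getD (arr.getD x.toNat 0) []).length := List.length_filter_le _ _
  have hg1 : (if 1 < x then [x - 1] else ([] : List Int)).length ≤ 1 := by
    split_ifs <;> simp
  have hg2 : (if x + 1 < (arr.length : Int) then [x + 1] else ([] : List Int)).length ≤ 1 := by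
    split_ifs <;> simp
  unfold Phi
  simp only [List.length_append, List.length_cons]
  omega

-- ---------- the master run lemma for A ----------

lemma master (arr : List Int) (hL : 2 ≤ arr.length) :
    ∀ (t fuel : Nat) (k : Nat) (cur nxt : List Int) (V : PySem.Set Int)
      (D : PySem.Dict Int (List Int)) (steps : Int),
    InvS arr k cur nxt V D →
    Phi arr cur nxt V D ≤ fuel →
    Rk arr (k + t) (arr.length - 1) →
    (∀ t' < t, ¬ Rk arr (k + t') (arr.length - 1)) →
    bfsLoopL arr (arr.length : Int) fuel cur nxt steps V D = some (steps + t) := by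
  intro t
  induction t using Nat.strong_induction_on with
  | _ t IHt =>
  intro fuel
  induction fuel using Nat.strong_induction_on with
  | _ fuel IHf =>
  intro k cur nxt V D steps hInv hPhi hR hmin
  rcases Nat.eq_zero_or_pos t with rfl | ht
  · -- t = 0: the target is in the current frontier
    have hR0 : Rk arr k (arr.length - 1) := by simpa using hR
    have hcast : ((arr.length - 1 : Nat) : Int) = (arr.length : Int) - 1 := by omega
    have hmem : ((arr.length : Int) - 1) ∈ cur := by
      rcases hInv.hcov (arr.length - 1) (by omega) hR0 with h | h
      · exact absurd (by rwa [hcast] at h) hInv.htgt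
      · rwa [hcast] at h
    have hflen : cur.length ≤ fuel := le_trans (by unfold Phi at hPhi ⊢; omega) hPhi
    rw [loopL_ret arr _ cur fuel nxt V D steps hmem hflen]
    simp
  · -- t ≥ 1
    have hkno : ¬ Rk arr k (arr.length - 1) := by simpa using hmin 0 ht
    cases cur with
    | nil =>
      cases nxt with
      | nil =>
        exfalso
        obtain ⟨i, hiL, hi1, hi0⟩ := Rk_progress arr (by omega) hkno
        rcases hInv.hfront i hiL hi1 hi0 with h | ⟨j, hj, _, _⟩
        · simp at h
        · simp at hj
      | cons y ys =>
        rw [bfsLoopL]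
        obtain ⟨t', rfl⟩ : ∃ t', t = t' + 1 := ⟨t - 1, by omega⟩
        have hR' : Rk arr (k + 1 + t') (arr.length - 1) := by
          rwa [show k + 1 + t' = k + (t' + 1) by omega]
        have hmin' : ∀ s < t', ¬ Rk arr (k + 1 + s) (arr.length - 1) := by
          intro s hs
          rw [show k + 1 + s = k + (s + 1) by omega]
          exact hmin (s + 1) (by omega)
        have hPhi' : Phi arr (y :: ys) [] V D ≤ fuel :=
          le_trans (by unfold Phi; omega) hPhi
        rw [IHt t' (by omega) fuel (k + 1) (y :: ys) [] V D (steps + 1)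
          (inv_switch arr k (y :: ys) V D hInv) hPhi' hR' hmin']
        congr 1
        push_cast
        ring
    | cons x rest =>
      cases fuel with
      | zero =>
        exfalso
        have : 0 < Phi arr (x :: rest) nxt V D := by
          unfold Phi
          simp only [List.length_cons]
          omega
        omega
      | succ f =>
        obtain ⟨hx0, hxlt, hxR⟩ := hInv.hcur x List.mem_cons_self
        have hxn : x ≠ (arr.length : Int) - 1 := by
          intro h
          apply hkno
          have he : x.toNat = arr.length - 1 := by omega
          rwa [he] at hxR
        rw [bfsLoopL]
        rw [if_neg hxn]
        by_cases hv : V.contains x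
        · simp only [if_pos hv]
          refine IHf f (by omega) k rest nxt V D steps
            (inv_skip arr k x rest nxt V D hInv hv)
            (by unfold Phi at hPhi ⊢; simp only [List.length_cons] at hPhi; omega)
            hR hmin
        · simp only [if_neg hv]
          simp only [pyget_in arr x 0 hx0 hxlt]
          refine IHf f (by omega) k rest _ (PySem.Set.add V x)
            (D.insert (arr.getD x.toNat 0) []) steps
            (inv_process arr k x rest nxt V D hInv hv hxn)
            ?_ hR hmin
          have := phi_process arr x rest nxt V D hx0 hxlt hv
          omega

-- ---------- B computes the same recurrence ----------

def rlInit (arr : List Int) : List Bool :=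
  (PySem.List.pyRange 0 (PySem.List.len arr)).map (fun i => i == 0)

def rlIter (arr : List Int) (s : Nat) : List Bool :=
  (bfsStep arr (arr.length : Int))^[s] (rlInit arr)

lemma vals_contains (arr : List Int) (r : List Bool) (hlen : r.length = arr.length) (a : Int) :
    ((bfsVals arr r).contains a = true ↔
      ∃ kk : Nat, kk < arr.length ∧ r.getD kk false = true ∧ arr.getD kk 0 = a) := by
  unfold bfsVals
  rw [show ∀ s : PySem.Set Int, (s.contains a = true) = (a ∈ s) from fun s => by
    simp [PySem.Set.contains]]
  rw [show (a ∈ PySem.Set.ofList (((PySem.List.enumerate r).filter (fun p => p.2)).map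
      (fun p => (PySem.List.pyGet? arr p.1).getD 0))) ↔
      a ∈ ((PySem.List.enumerate r).filter (fun p => p.2)).map
      (fun p => (PySem.List.pyGet? arr p.1).getD 0) from PySem.Set.mem_ofList ..]
  simp only [List.mem_map, List.mem_filter]
  constructor
  · rintro ⟨p, ⟨hp, hr⟩, ha⟩
    rw [PySem.List.mem_enumerate_iff] at hp
    obtain ⟨kk, hk, rfl⟩ := hp
    simp only [Int.zero_add] at ha ⊢
    refine ⟨kk, by omega, ?_, ?_⟩
    · rw [List.getD_eq_getElem?_getD, List.getElem?_eq_getElem hk]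
      exact hr
    · rwa [pyget_nat arr kk 0] at ha
  · rintro ⟨kk, hk, hr, ha⟩
    have hk' : kk < r.length := by omega
    refine ⟨((kk : Int), r[kk]), ⟨?_, ?_⟩, ?_⟩
    · rw [PySem.List.mem_enumerate_iff]
      exact ⟨kk, hk', by simp⟩
    · rw [List.getD_eq_getElem?_getD, List.getElem?_eq_getElem hk'] at hr
      exact hr
    · rw [pyget_nat arr kk 0]
      exact ha

lemma step_get (arr : List Int) (r : List Bool) (hlen : r.length = arr.length)
    (i : Nat) (hi : i < arr.length) :
    ((bfsStep arr (arr.length : Int) r).getD i false = true ↔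
      (r.getD i false = true ∨
       (∃ kk : Nat, kk < arr.length ∧ r.getD kk false = true ∧ arr.getD kk 0 = arr.getD i 0) ∨
       (1 ≤ i ∧ r.getD (i - 1) false = true) ∨
       (1 ≤ i ∧ i + 1 < arr.length ∧ r.getD (i + 1) false = true))) := by
  have hi' : i < r.length := by omega
  unfold bfsStep
  rw [enum_eq_range r 0, List.map_map, List.getD_eq_getElem?_getD,
      List.getElem?_map, List.getElem?_range hi']
  simp only [Option.map_some, Option.getD_some, Function.comp_apply, Int.zero_add,
    show (default : Bool) = false from rfl]
  rw [pyget_nat arr i 0]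
  simp only [Bool.or_eq_true, Bool.and_eq_true, decide_eq_true_iff]
  rw [vals_contains arr r hlen]
  constructor
  · rintro (((h | h) | ⟨h1, h⟩) | ⟨⟨h1, h2⟩, h⟩)
    · exact Or.inl h
    · exact Or.inr (Or.inl h)
    · rw [show ((i : Int) - 1) = ((i - 1 : Nat) : Int) by omega, pyget_nat] at h
      exact Or.inr (Or.inr (Or.inl ⟨by omega, h⟩))
    · rw [show ((i : Int) + 1) = ((i + 1 : Nat) : Int) by omega, pyget_nat] at h
      exact Or.inr (Or.inr (Or.inr ⟨by omega, by omega, h⟩))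
  · rintro (h | h | ⟨h1, h⟩ | ⟨h1, h2, h⟩)
    · exact Or.inl (Or.inl (Or.inl h))
    · exact Or.inl (Or.inl (Or.inr h))
    · refine Or.inl (Or.inr ⟨by omega, ?_⟩)
      rwa [show ((i : Int) - 1) = ((i - 1 : Nat) : Int) by omega, pyget_nat]
    · refine Or.inr ⟨⟨by omega, by omega⟩, ?_⟩
      rwa [show ((i : Int) + 1) = ((i + 1 : Nat) : Int) by omega, pyget_nat]

lemma rl_len (arr : List Int) (s : Nat) : (rlIter arr s).length = arr.length := by
  induction s with
  | zero =>
    unfold rlIter rlInit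
    rw [Function.iterate_zero_apply, PySem.List.len_eq, PySem.List.pyRange_zero_nat]
    simp
  | succ p ih =>
    unfold rlIter at ih ⊢
    rw [Function.iterate_succ_apply']
    unfold bfsStep
    rw [List.length_map, PySem.List.length_enumerate]
    exact ih

lemma rl_get (arr : List Int) (s : Nat) (i : Nat) (hi : i < arr.length) :
    ((rlIter arr s).getD i false = true ↔ Rk arr s i) := by
  induction s generalizing i with
  | zero =>
    unfold rlIter rlInit
    rw [Function.iterate_zero_apply, PySem.List.len_eq, PySem.List.pyRange_zero_nat,
        List.map_map, List.getD_eq_getElem?_getD, List.getElem?_map, List.getElem?_range hi]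
    show ((((i : Nat) : Int) == 0) = true ↔ Rk arr 0 i)
    simp only [beq_iff_eq]
    show ((i : Int) = 0 ↔ i = 0)
    omega
  | succ p ih =>
    have hlen : (rlIter arr p).length = arr.length := rl_len arr p
    have hstep : rlIter arr (p + 1) = bfsStep arr (arr.length : Int) (rlIter arr p) := by
      unfold rlIter
      rw [Function.iterate_succ_apply']
    rw [hstep, step_get arr (rlIter arr p) hlen i hi]
    show _ ↔ (Rk arr p i ∨ _ ∨ _ ∨ _)
    constructor
    · rintro (h | ⟨kk, hk, hr, ha⟩ | ⟨h1, h⟩ | ⟨h1, h2, h⟩)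
      · exact Or.inl ((ih i hi).mp h)
      · exact Or.inr (Or.inl ⟨hi, kk, hk, (ih kk hk).mp hr, ha⟩)
      · exact Or.inr (Or.inr (Or.inl ⟨h1, hi, (ih (i - 1) (by omega)).mp h⟩))
      · exact Or.inr (Or.inr (Or.inr ⟨h1, h2, (ih (i + 1) h2).mp h⟩))
    · rintro (h | ⟨_, kk, hk, hr, ha⟩ | ⟨h1, _, h⟩ | ⟨h1, h2, h⟩)
      · exact Or.inl ((ih i hi).mpr h)
      · exact Or.inr (Or.inl ⟨kk, hk, (ih kk hk).mpr hr, ha⟩)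
      · exact Or.inr (Or.inr (Or.inl ⟨h1, (ih (i - 1) (by omega)).mpr h⟩))
      · exact Or.inr (Or.inr (Or.inr ⟨h1, h2, (ih (i + 1) h2).mpr h⟩))

lemma bmain (arr : List Int) (hL : 2 ≤ arr.length) (sstar : Nat)
    (hs : Rk arr sstar (arr.length - 1))
    (hmin : ∀ t < sstar, ¬ Rk arr t (arr.length - 1)) :
    ∀ (f s : Nat), sstar ≤ s + f → s ≤ sstar →
    bfsLoopAlt arr (arr.length : Int) f (rlIter arr s) (s : Int) = some (sstar : Int) := by
  intro f
  induction f with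
  | zero =>
    intro s h1 h2
    have hse : s = sstar := by omega
    subst hse
    rw [bfsLoopAlt]
    have hcond : (PySem.List.pyGet? (rlIter arr s) ((arr.length : Int) - 1)).getD false = true := by
      have e : ((arr.length : Int) - 1) = ((arr.length - 1 : Nat) : Int) := by omega
      rw [e, pyget_nat]
      exact (rl_get arr s (arr.length - 1) (by omega)).mpr hs
    rw [if_pos hcond]
  | succ f ih =>
    intro s h1 h2
    rw [bfsLoopAlt]
    have e : ((arr.length : Int) - 1) = ((arr.length - 1 : Nat) : Int) := by omega
    by_cases hc : Rk arr s (arr.length - 1)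
    · have hse : s = sstar := by
        by_contra hne
        exact hmin s (by omega) hc
      subst hse
      have hcond : (PySem.List.pyGet? (rlIter arr s) ((arr.length : Int) - 1)).getD false = true := by
        rw [e, pyget_nat]
        exact (rl_get arr s (arr.length - 1) (by omega)).mpr hc
      rw [if_pos hcond]
    · have hcond : ¬ (PySem.List.pyGet? (rlIter arr s) ((arr.length : Int) - 1)).getD false = true := by
        rw [e, pyget_nat]
        intro hcc
        exact hc ((rl_get arr s (arr.length - 1) (by omega)).mp hcc)
      rw [if_neg hcond]
      have hslt : s < sstar := by
        by_contra hge
        have hse : s = sstar := by omega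
        subst hse
        exact hc hs
      have hrec : bfsStep arr (arr.length : Int) (rlIter arr s) = rlIter arr (s + 1) := by
        unfold rlIter
        rw [Function.iterate_succ_apply']
      rw [hrec, show (s : Int) + 1 = ((s + 1 : Nat) : Int) by push_cast; ring]
      exact ih (s + 1) (by omega) (by omega)

-- ===== VERDICT (by name: the statement is the Claim_ definition above) =====
theorem bfs_spec : Claim_equal_bfs := by
  intro arr _ hpre
  unfold Spec_bfs bfs bfs_alt
  simp only [PySem.List.len_eq]
  by_cases h1 : (arr.length : Int) = 1
  · simp [h1]
  · have hL : 2 ≤ arr.length := by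
      have := List.length_pos_iff.mpr hpre
      omega
    rw [if_neg h1, if_neg h1]
    -- the minimal number of rounds after which the last index is reachable
    have hex : Rk arr (arr.length - 1) (arr.length - 1) := Rk_chain arr (by omega)
    obtain ⟨sstar, hsP, hsmin'⟩ := (wellFounded_lt (α := ℕ)).has_min
      {s | Rk arr s (arr.length - 1)} ⟨_, hex⟩
    have hsP : Rk arr sstar (arr.length - 1) := hsP
    have hsmin : ∀ t < sstar, ¬ Rk arr t (arr.length - 1) := fun t ht hc => hsmin' t hc ht
    have hsle : sstar ≤ arr.length - 1 := by
      by_contra hgt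
      exact hsmin (arr.length - 1) (by omega) hex
    -- A's queue loop equals the level-order loop
    have hsim := bfs_sim arr (arr.length : Int) ((arr.length + 2) * (arr.length + 2)) [0] [] 0
      PySem.Set.empty (bfsIdxB arr)
      (by intro x hx; simp at hx; omega)
      (by intro x hx; simp at hx)
      (by intro k x hx; simpa using bfsIdx_range arr k x hx)
    rw [bfsIdx_eq]
    simp only [List.map, List.append_nil] at hsim
    rw [hsim]
    -- the level-order loop returns sstar
    have invInit : InvS arr 0 [0] [] PySem.Set.empty (bfsIdxB arr) := by
      refine ⟨?_, ?_, ?_, ?_, ?_, ?_, ?_⟩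
      · intro x hx
        simp at hx
        subst hx
        exact ⟨le_refl 0, by omega, rfl⟩
      · intro x hx; simp at hx
      · intro x hx
        simp [PySem.Set.contains, PySem.Set.empty] at hx
      · intro i hi hr
        cases hr
        simp
      · intro i hi hr h0
        rw [Rk_succ_iff] at hr
        rcases hr with hr | ⟨j, hj, hadj⟩
        · exact absurd hr h0
        · cases hj
          refine Or.inr ⟨0, by simp, ?_, hadj⟩
          simp [PySem.Set.contains, PySem.Set.empty]
      · intro v; exact Or.inl rfl
      · simp [PySem.Set.contains, PySem.Set.empty]
    have phiInit : Phi arr [0] [] PySem.Set.empty (bfsIdxB arr)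
        ≤ (arr.length + 2) * (arr.length + 2) := by
      have hu : uCnt arr PySem.Set.empty ≤ arr.length := by
        unfold uCnt
        calc ((Finset.range arr.length).filter _).card
            ≤ (Finset.range arr.length).card := Finset.card_filter_le _ _
          _ = arr.length := Finset.card_range _
      have hsc : sCnt arr (bfsIdxB arr) ≤ arr.length * arr.length := by
        unfold sCnt
        calc ∑ v ∈ arr.toFinset, ((bfsIdxB arr).getD v []).length
            ≤ ∑ _v ∈ arr.toFinset, arr.length :=
              Finset.sum_le_sum (fun v _ => grpB_len_le arr v)
          _ = arr.toFinset.card * arr.length := by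
              rw [Finset.sum_const, smul_eq_mul]
          _ ≤ arr.length * arr.length :=
              Nat.mul_le_mul_right _ arr.toFinset_card_le
      have he : (arr.length + 2) * (arr.length + 2)
          = arr.length * arr.length + 4 * arr.length + 4 := by ring
      unfold Phi
      simp only [List.length_cons, List.length_nil]
      omega
    have hA := master arr hL sstar ((arr.length + 2) * (arr.length + 2)) 0 [0] []
      PySem.Set.empty (bfsIdxB arr) 0 invInit phiInit (by simpa using hsP)
      (by simpa using hsmin)
    rw [hA]
    -- B's round loop returns sstar
    have hInitEq : ((PySem.List.pyRange 0 ((arr.length : Nat) : Int)).map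
        (fun i => i == 0)) = rlIter arr 0 := by
      unfold rlIter rlInit
      rw [Function.iterate_zero_apply, PySem.List.len_eq]
    rw [hInitEq]
    have hB := bmain arr hL sstar hsP hsmin arr.length 0 (by omega) (Nat.zero_le _)
    rw [show ((0 : Nat) : Int) = 0 from rfl] at hB
    rw [hB]
    simp
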